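-- pv_equiv track=rewrite | github.com/effect/bii-14s | grigorev/C-1.py | anagram_generator
-- ===== SOURCE A (Python) =====
-- vowels = list("aeiouy")
--
-- def anagram_generator(head, target_length, unique_letters, letter_count):
-- 	if len(head) < target_length:
-- 		for letter in unique_letters:
-- 			if head.count(letter) < letter_count[letter]: # not all instances in head
-- 				if len(head) > 0 and head[-1] in vowels and letter in vowels: # consecutive vowels
-- 					continue
-- 				for anagram in anagram_generator(head + [letter], target_length, unique_letters, letter_count):
-- 					yield anagram
-- 	else:
-- 		yield head
-- ===== SOURCE B (Python) =====
-- VOWELS = {"a", "e", "i", "o", "u", "y"}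
--
-- def anagram_generator(head, target_length, unique_letters, letter_count):
--     # Level-by-level expansion: keep all valid partials of the current length,
--     # extend every one of them by every admissible letter at once.
--     partials = [list(head)]
--     while partials and len(partials[0]) < target_length:
--         partials = [
--             p + [letter]
--             for p in partials
--             for letter in unique_letters
--             if p.count(letter) < letter_count[letter]
--             and not (p and p[-1] in VOWELS and letter in VOWELS)
--         ]
--     yield from partials
-- ===== Notes on version B (the rewrite author's own statement) =====
-- stated objective: alternative
-- what changed: A's recursive depth-first generator is replaced by an iterative level-by-level (breadth-first) expansion that keeps the whole frontier of partial anagrams and extends every partial by every admissible letter at once; since all completions have exactly the target length and level-wise expansion preserves the depth-first lexicographic order, the yielded sequence is identical.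
import Mathlib
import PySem

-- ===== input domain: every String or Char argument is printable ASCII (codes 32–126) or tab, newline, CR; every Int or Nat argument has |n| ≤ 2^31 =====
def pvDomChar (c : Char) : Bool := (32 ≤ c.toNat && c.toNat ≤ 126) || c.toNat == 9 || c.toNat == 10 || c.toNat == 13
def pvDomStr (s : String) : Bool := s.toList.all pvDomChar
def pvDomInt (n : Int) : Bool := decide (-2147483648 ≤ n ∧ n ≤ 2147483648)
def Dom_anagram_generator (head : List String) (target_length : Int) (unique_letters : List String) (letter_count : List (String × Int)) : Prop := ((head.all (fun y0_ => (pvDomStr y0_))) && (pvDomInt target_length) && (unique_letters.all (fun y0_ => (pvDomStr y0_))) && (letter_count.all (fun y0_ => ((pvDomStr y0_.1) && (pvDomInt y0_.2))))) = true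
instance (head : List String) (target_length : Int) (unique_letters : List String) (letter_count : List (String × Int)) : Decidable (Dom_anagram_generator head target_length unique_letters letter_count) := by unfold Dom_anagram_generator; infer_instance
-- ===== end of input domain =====

-- B replaces A's recursive depth-first generator by an iterative level-by-level (breadth-first)
-- expansion of the whole frontier of partials; same yielded sequence (objective: alternative).

-- ===== PORT A =====
-- module-level 'vowels = list("aeiouy")'
def pvVowels : List String := ["a", "e", "i", "o", "u", "y"]

-- A's recursion; 'fuel' is only a totality guard: the wrapper passes
-- (target_length - len(head)).toNat, which the recursion never exhausts,
-- since every recursive call is made under 'len(head) < target_length'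
-- and lengthens head by one.
def pvAgA (target_length : Int) (unique_letters : List String) (letter_count : List (String × Int)) : Nat → List String → List (List String)
  | fuel, head =>
    if ((head.length : Int) < target_length) then
      match fuel with
      | 0 => []
      | fuel + 1 =>
        unique_letters.foldl (fun acc letter =>
          if PySem.List.count head letter < PySem.Dict.getD (PySem.Dict.mk letter_count) letter 0 then
            if 0 < head.length ∧ pvVowels.contains (PySem.List.pyGetD head (-1) "") ∧ pvVowels.contains letter then
              acc  -- 'continue'
            else
              acc ++ pvAgA target_length unique_letters letter_count fuel (head ++ [letter])
          else acc) []
    else [head]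

def anagram_generator (head : List String) (target_length : Int) (unique_letters : List String) (letter_count : List (String × Int)) : List (List String) :=
  pvAgA target_length unique_letters letter_count (target_length - (head.length : Int)).toNat head

-- ===== PORT B =====
-- B's module-level 'VOWELS = {"a","e","i","o","u","y"}'
def pvVowelSet : PySem.Set String := PySem.Set.ofList ["a", "e", "i", "o", "u", "y"]

-- one partial's contribution to the comprehension:
-- [p + [letter] for letter in unique_letters if p.count(letter) < letter_count[letter]
--  and not (p and p[-1] in VOWELS and letter in VOWELS)]
def pvChildren (unique_letters : List String) (letter_count : List (String × Int)) (p : List String) : List (List String) :=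
  unique_letters.filterMap (fun letter =>
    if PySem.List.count p letter < PySem.Dict.getD (PySem.Dict.mk letter_count) letter 0 ∧
        ¬(0 < p.length ∧ pvVowelSet.contains (PySem.List.pyGetD p (-1) "") ∧ pvVowelSet.contains letter) then
      some (p ++ [letter])
    else none)

-- B's while loop; 'fuel' is only a totality guard (the wrapper passes
-- (target_length - len(head)).toNat, one unit per level of expansion).
def pvAgB (target_length : Int) (unique_letters : List String) (letter_count : List (String × Int)) : Nat → List (List String) → List (List String)
  | 0, partials => partials
  | fuel + 1, partials =>
    match partials with
    | [] => []
    | p :: rest =>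
      if ((p.length : Int) < target_length) then
        pvAgB target_length unique_letters letter_count fuel
          ((p :: rest).flatMap (pvChildren unique_letters letter_count))
      else p :: rest

def anagram_generator_alt (head : List String) (target_length : Int) (unique_letters : List String) (letter_count : List (String × Int)) : List (List String) :=
  pvAgB target_length unique_letters letter_count (target_length - (head.length : Int)).toNat [head]

-- ===== PRECONDITION & SPEC =====
-- Pre_ excludes exactly the inputs on which the Python A raises KeyError (it happens iff
-- len(head) < target_length and some letter of unique_letters is not a key of letter_count);
-- the Python B raises KeyError on the same inputs.
def Pre_anagram_generator (head : List String) (target_length : Int) (unique_letters : List String) (letter_count : List (String × Int)) : Prop :=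
  target_length ≤ (head.length : Int) ∨ ∀ l ∈ unique_letters, (PySem.Dict.get? (PySem.Dict.mk letter_count) l).isSome
instance (head : List String) (target_length : Int) (unique_letters : List String) (letter_count : List (String × Int)) : Decidable (Pre_anagram_generator head target_length unique_letters letter_count) := by unfold Pre_anagram_generator; infer_instance

def pvWitness_anagram_generator : List String × Int × List String × (List (String × Int)) :=
  (["a"], 2, ["a", "b"], [("a", 2), ("b", 1)])

def Spec_anagram_generator (head : List String) (target_length : Int) (unique_letters : List String) (letter_count : List (String × Int)) (out : List (List String)) : Prop := out = anagram_generator_alt head target_length unique_letters letter_count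
instance (head : List String) (target_length : Int) (unique_letters : List String) (letter_count : List (String × Int)) (out : List (List String)) : Decidable (Spec_anagram_generator head target_length unique_letters letter_count out) := by unfold Spec_anagram_generator; infer_instance

-- ===== CLAIM (what is proved, stated in full; the proofs are below) =====
def Claim_equal_anagram_generator : Prop := ∀ (head : List String) (target_length : Int) (unique_letters : List String) (letter_count : List (String × Int)), Dom_anagram_generator head target_length unique_letters letter_count → Pre_anagram_generator head target_length unique_letters letter_count → Spec_anagram_generator head target_length unique_letters letter_count (anagram_generator head target_length unique_letters letter_count)

-- ===== LEMMAS AND PROOFS =====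

lemma pvVowelSet_contains (x : String) : pvVowelSet.contains x = pvVowels.contains x := by
  have h : pvVowelSet = pvVowels := by decide
  simp [h, PySem.Set.contains_eq_listContains]

lemma pvFlatMap_congr_mem {α β : Type} (l : List α) (f g : α → List β)
    (h : ∀ a ∈ l, f a = g a) : l.flatMap f = l.flatMap g := by
  induction l with
  | nil => rfl
  | cons a l ih =>
    simp only [List.flatMap_cons]
    rw [h a (by simp), ih (fun a ha => h a (by simp [ha]))]

-- A's inner for-loop over the letters equals B's per-partial comprehension
-- followed by recursion into each child.
lemma pvFoldA (target_length : Int) (unique_letters : List String) (letter_count : List (String × Int))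
    (fuel : Nat) (p : List String) :
    ∀ (letters : List String) (acc : List (List String)),
      letters.foldl (fun acc letter =>
        if PySem.List.count p letter < PySem.Dict.getD (PySem.Dict.mk letter_count) letter 0 then
          if 0 < p.length ∧ pvVowels.contains (PySem.List.pyGetD p (-1) "") ∧ pvVowels.contains letter then
            acc
          else
            acc ++ pvAgA target_length unique_letters letter_count fuel (p ++ [letter])
        else acc) acc
      = acc ++ (letters.filterMap (fun letter =>
          if PySem.List.count p letter < PySem.Dict.getD (PySem.Dict.mk letter_count) letter 0 ∧
              ¬(0 < p.length ∧ pvVowelSet.contains (PySem.List.pyGetD p (-1) "") ∧ pvVowelSet.contains letter) then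
            some (p ++ [letter])
          else none)).flatMap (pvAgA target_length unique_letters letter_count fuel) := by
  intro letters
  induction letters with
  | nil => intro acc; simp
  | cons letter rest ih =>
    intro acc
    have hsl : ∀ x, pvVowelSet.contains x = true ↔ pvVowels.contains x = true := fun x => by
      rw [pvVowelSet_contains]
    simp only [List.foldl_cons, List.filterMap_cons]
    by_cases h1 : (PySem.List.count p letter : Int) < PySem.Dict.getD (PySem.Dict.mk letter_count) letter 0
    · by_cases h2 : 0 < p.length ∧ pvVowels.contains (PySem.List.pyGetD p (-1) "") = true ∧ pvVowels.contains letter = true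
      · have hB : ¬((PySem.List.count p letter : Int) < PySem.Dict.getD (PySem.Dict.mk letter_count) letter 0 ∧
            ¬(0 < p.length ∧ pvVowelSet.contains (PySem.List.pyGetD p (-1) "") = true ∧ pvVowelSet.contains letter = true)) :=
          fun h => h.2 ⟨h2.1, (hsl _).mpr h2.2.1, (hsl _).mpr h2.2.2⟩
        rw [if_pos h1, if_pos h2, if_neg hB, ih]
      · have hB : (PySem.List.count p letter : Int) < PySem.Dict.getD (PySem.Dict.mk letter_count) letter 0 ∧
            ¬(0 < p.length ∧ pvVowelSet.contains (PySem.List.pyGetD p (-1) "") = true ∧ pvVowelSet.contains letter = true) :=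
          ⟨h1, fun h => h2 ⟨h.1, (hsl _).mp h.2.1, (hsl _).mp h.2.2⟩⟩
        rw [if_pos h1, if_neg h2, if_pos hB, ih, List.flatMap_cons, List.append_assoc]
    · have hB : ¬((PySem.List.count p letter : Int) < PySem.Dict.getD (PySem.Dict.mk letter_count) letter 0 ∧
          ¬(0 < p.length ∧ pvVowelSet.contains (PySem.List.pyGetD p (-1) "") = true ∧ pvVowelSet.contains letter = true)) :=
        fun h => h1 h.1
      rw [if_neg h1, if_neg hB, ih]

-- the invariant linking B's frontier loop to A's recursion: all partials on the
-- frontier have the same length L and the fuel is (target_length - L).toNat.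
lemma pvLoop (target_length : Int) (unique_letters : List String) (letter_count : List (String × Int)) :
    ∀ (fuel : Nat) (L : Nat) (partials : List (List String)),
      (∀ p ∈ partials, p.length = L) → (target_length - (L : Int)).toNat = fuel →
      pvAgB target_length unique_letters letter_count fuel partials
        = partials.flatMap (pvAgA target_length unique_letters letter_count fuel) := by
  intro fuel
  induction fuel with
  | zero =>
    intro L partials hlen hfuel
    have hle : ¬ ((L : Int) < target_length) := by omega
    have : ∀ p ∈ partials, pvAgA target_length unique_letters letter_count 0 p = [p] := by
      intro p hp
      rw [pvAgA, if_neg (by rw [hlen p hp]; exact hle)]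
    calc pvAgB target_length unique_letters letter_count 0 partials = partials := by rw [pvAgB]
      _ = partials.flatMap (fun p => [p]) := by simp
      _ = _ := (pvFlatMap_congr_mem _ _ _ this).symm
  | succ fuel ih =>
    intro L partials hlen hfuel
    have hlt : (L : Int) < target_length := by omega
    match partials with
    | [] => rw [pvAgB]; simp
    | p :: rest =>
      have hp : p.length = L := hlen p (by simp)
      have hcond : ((p.length : Int) < target_length) := by rw [hp]; exact hlt
      rw [pvAgB]
      simp only [if_pos hcond]
      rw [ih (L + 1) _ ?_ (by omega)]
      · rw [List.flatMap_assoc]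
        refine (pvFlatMap_congr_mem _ _ _ ?_).symm
        intro q hq
        have hq' : q.length = L := hlen q hq
        rw [pvAgA, if_pos (by rw [hq']; exact hlt)]
        exact (pvFoldA target_length unique_letters letter_count fuel q unique_letters []).trans
          (by rw [List.nil_append]; rfl)
      · intro q hq
        simp only [List.mem_flatMap, pvChildren, List.mem_filterMap] at hq
        obtain ⟨p', hp', letter, _, hsome⟩ := hq
        split at hsome
        · cases hsome
          simp [hlen p' hp']
        · cases hsome

-- ===== VERDICT (by name: the statement is the Claim_ definition above) =====
theorem anagram_generator_spec : Claim_equal_anagram_generator := by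
  intro head target_length unique_letters letter_count _ _
  unfold Spec_anagram_generator anagram_generator anagram_generator_alt
  rw [pvLoop target_length unique_letters letter_count _ head.length [head]
      (by intro p hp; simp at hp; rw [hp]) rfl]
  simp
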